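-- pv_equiv track=rewrite | github.com/Veereshamaragatti/GeoClusterEngine | modules/visualize.py | _generate_cluster_colors
-- ===== SOURCE A (Python) =====
-- def _generate_cluster_colors(n_clusters: int) -> list:
--     """
--     Generate distinct colors for clusters.
--
--     Args:
--         n_clusters: Number of clusters
--
--     Returns:
--         List of color strings
--     """
--     base_colors = [
--         'red', 'blue', 'green', 'purple', 'orange',
--         'darkred', 'darkblue', 'darkgreen', 'cadetblue', 'pink',
--         'lightred', 'lightblue', 'lightgreen', 'beige', 'gray'
--     ]
--
--     colors = []
--     for i in range(n_clusters):
--         colors.append(base_colors[i % len(base_colors)])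
--
--     return colors
-- ===== SOURCE B (Python) =====
-- _BASE_COLORS = (
--     'red', 'blue', 'green', 'purple', 'orange',
--     'darkred', 'darkblue', 'darkgreen', 'cadetblue', 'pink',
--     'lightred', 'lightblue', 'lightgreen', 'beige', 'gray'
-- )
--
--
-- def _generate_cluster_colors(n_clusters: int) -> list:
--     """Generate cluster colors from a rotating work queue of the palette."""
--     colors = []
--     queue = []
--     remaining = n_clusters
--     while remaining > 0:
--         if not queue:
--             queue = list(_BASE_COLORS)
--         colors.append(queue.pop(0))
--         remaining -= 1
--     return colors
-- ===== Notes on version B (the rewrite author's own statement) =====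
-- stated objective: alternative
-- what changed: Replaces the index-and-modulo loop with a rotating work queue: a countdown loop that pops colors off a working copy of the palette and refills it from the palette whenever it empties, so no index arithmetic or modulo is used.
import Mathlib
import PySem

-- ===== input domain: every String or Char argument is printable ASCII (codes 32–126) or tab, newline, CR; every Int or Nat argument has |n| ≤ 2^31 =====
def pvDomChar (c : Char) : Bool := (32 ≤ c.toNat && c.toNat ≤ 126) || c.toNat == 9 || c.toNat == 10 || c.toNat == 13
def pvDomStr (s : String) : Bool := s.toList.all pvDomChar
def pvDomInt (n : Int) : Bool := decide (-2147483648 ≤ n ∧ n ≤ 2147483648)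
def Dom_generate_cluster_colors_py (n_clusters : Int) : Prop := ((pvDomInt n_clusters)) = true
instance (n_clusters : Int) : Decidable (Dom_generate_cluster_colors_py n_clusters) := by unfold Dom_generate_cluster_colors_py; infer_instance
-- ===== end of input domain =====

-- B replaces A's index-and-modulo loop with a rotating work queue (pop the front, refill from the palette when empty); same cost, different decomposition.

-- ===== PORT A =====
-- loop 'for i in range(n): colors.append(base_colors[i % len(base_colors)])';
-- the index i % 15 is always in range, so pyGetD with default "" is exact here.
def generate_cluster_colors_py (n_clusters : Int) : List String :=
  let base_colors : List String :=
    ["red", "blue", "green", "purple", "orange",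
     "darkred", "darkblue", "darkgreen", "cadetblue", "pink",
     "lightred", "lightblue", "lightgreen", "beige", "gray"]
  (PySem.List.pyRange 0 n_clusters 1).foldl
    (fun colors i =>
      colors ++ [PySem.List.pyGetD base_colors (PySem.Int.mod i (base_colors.length : Int)) ""]) []

-- ===== PORT B =====
-- module constant _BASE_COLORS of Source B
def pvPalette : List String :=
  ["red", "blue", "green", "purple", "orange",
   "darkred", "darkblue", "darkgreen", "cadetblue", "pink",
   "lightred", "lightblue", "lightgreen", "beige", "gray"]

-- the while loop of Source B: count down `remaining`, pop the queue's front,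
-- refill the queue with the palette when it is empty
def pvCycleTake : Nat → List String → List String
  | 0, _ => []
  | Nat.succ k, c :: queue => c :: pvCycleTake k queue
  | Nat.succ k, [] =>
    match pvPalette with
    | c :: queue => c :: pvCycleTake k queue
    | [] => []

def generate_cluster_colors_py_alt (n_clusters : Int) : List String :=
  pvCycleTake n_clusters.toNat []

-- ===== PRECONDITION & SPEC =====
def Spec_generate_cluster_colors_py (n_clusters : Int) (out : List String) : Prop := out = generate_cluster_colors_py_alt n_clusters
instance (n_clusters : Int) (out : List String) : Decidable (Spec_generate_cluster_colors_py n_clusters out) := by unfold Spec_generate_cluster_colors_py; infer_instance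

-- ===== CLAIM (what is proved, stated in full; the proofs are below) =====
def Claim_equal_generate_cluster_colors_py : Prop := ∀ (n_clusters : Int), Dom_generate_cluster_colors_py n_clusters → Spec_generate_cluster_colors_py n_clusters (generate_cluster_colors_py n_clusters)

-- ===== LEMMAS AND PROOFS =====

-- common specification: n colors starting at palette offset m
def pvCyc (n m : Nat) : List String :=
  (List.range n).map (fun i => pvPalette.getD ((m + i) % 15) "")

lemma pvCyc_shift (n : Nat) : pvCyc n 15 = pvCyc n 0 := by
  unfold pvCyc
  refine List.map_congr_left (fun i _ => ?_)
  have : (15 + i) % 15 = (0 + i) % 15 := by omega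
  rw [this]

lemma pvCyc_cons (n m : Nat) (hm : m < 15) :
    pvCyc (n + 1) m = pvPalette.getD m "" :: pvCyc n (m + 1) := by
  unfold pvCyc
  rw [List.range_succ_eq_map]
  simp only [List.map_cons, List.map_map]
  congr 1
  · congr 1; omega
  · refine List.map_congr_left (fun i _ => ?_)
    simp only [Function.comp_apply]
    congr 1; omega

lemma pvCycleTake_eq (n : Nat) : ∀ m : Nat, m ≤ 15 →
    pvCycleTake n (pvPalette.drop m) = pvCyc n m := by
  induction n with
  | zero => intro m _; simp [pvCycleTake, pvCyc]
  | succ k ih =>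
    intro m hm
    by_cases h : m < 15
    · have hdrop : pvPalette.drop m = pvPalette.getD m "" :: pvPalette.drop (m + 1) := by
        interval_cases m <;> rfl
      rw [hdrop]
      show pvPalette.getD m "" :: pvCycleTake k (pvPalette.drop (m + 1)) = _
      rw [ih (m + 1) (by omega), pvCyc_cons k m h]
    · have hm15 : m = 15 := by omega
      subst hm15
      have hdrop : pvPalette.drop 15 = ([] : List String) := rfl
      rw [hdrop]
      show pvCycleTake (k + 1) [] = pvCyc (k + 1) 15
      rw [pvCyc_shift]
      have h0 : pvPalette.drop 0 = pvPalette := rfl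
      have := ih 1 (by omega)
      calc pvCycleTake (k + 1) []
          = "red" :: pvCycleTake k (pvPalette.drop 1) := rfl
        _ = "red" :: pvCyc k 1 := by rw [this]
        _ = pvCyc (k + 1) 0 := by rw [pvCyc_cons k 0 (by omega)]; rfl

lemma pvFold_eq_cyc (k : Nat) :
    (PySem.List.pyRange 0 (k : Int) 1).foldl
      (fun colors i => colors ++ [PySem.List.pyGetD pvPalette (PySem.Int.mod i (pvPalette.length : Int)) ""]) []
      = pvCyc k 0 := by
  induction k with
  | zero => simp [PySem.List.pyRange_one_eq_nil, pvCyc]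
  | succ k ih =>
    have hcast : ((k + 1 : Nat) : Int) = (k : Int) + 1 := by push_cast; ring
    rw [hcast, PySem.List.pyRange_one_succ_right (by exact_mod_cast Nat.zero_le k),
        List.foldl_append, ih]
    simp only [List.foldl]
    have hlen : (pvPalette.length : Int) = ((15 : Nat) : Int) := by simp [pvPalette]
    rw [hlen, PySem.Int.mod_natCast, PySem.List.pyGetD_natCast]
    unfold pvCyc
    rw [List.range_succ, List.map_append]
    simp

-- ===== VERDICT (by name: the statement is the Claim_ definition above) =====
theorem generate_cluster_colors_py_spec : Claim_equal_generate_cluster_colors_py := by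
  intro n _
  unfold Spec_generate_cluster_colors_py generate_cluster_colors_py_alt
  have hB : pvCycleTake n.toNat [] = pvCyc n.toNat 15 := by
    have := pvCycleTake_eq n.toNat 15 (by omega)
    rwa [show pvPalette.drop 15 = ([] : List String) from rfl] at this
  rw [hB, pvCyc_shift]
  by_cases h : n ≤ 0
  · have h0 : n.toNat = 0 := by omega
    show (PySem.List.pyRange 0 n 1).foldl _ [] = _
    rw [PySem.List.pyRange_one_eq_nil h, h0]
    simp [pvCyc]
  · have hn : n = ((n.toNat : Nat) : Int) := by omega
    show (PySem.List.pyRange 0 n 1).foldl _ [] = _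
    rw [hn]
    exact pvFold_eq_cyc n.toNat
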